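-- pv_equiv track=rewrite | github.com/AVenkat4/Hackerrank-problems-solutions | Beautiful Pairs.py | beautifulPairs
-- ===== SOURCE A (Python) =====
-- from collections import Counter
--
-- def beautifulPairs(A, B):
--
--     n = len(A)
--     countA, countB = Counter(A), Counter(B)
--     a_b = countA - countB
--     b_a = countB - countA
--     bset = countA - a_b
--     setsize = sum([bset[i] for i in bset])
--     if len(b_a) >0 and len(a_b) > 0:
--         return setsize + 1
--     elif len(a_b) == 0 and len(b_a) > 0:
--         return setsize
--     elif len(b_a) == 0 and len(a_b) >= 0:
--         return setsize - 1
--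
--     return setsize
-- ===== SOURCE B (Python) =====
-- def beautifulPairs(A, B):
--     sa, sb = sorted(A), sorted(B)
--     i = j = setsize = 0
--     while i < len(sa) and j < len(sb):
--         if sa[i] < sb[j]:
--             i += 1
--         elif sb[j] < sa[i]:
--             j += 1
--         else:
--             setsize += 1
--             i += 1
--             j += 1
--     if len(B) == setsize:
--         return setsize - 1
--     if len(A) > setsize:
--         return setsize + 1
--     return setsize
-- ===== Notes on version B (the rewrite author's own statement) =====
-- stated objective: alternative
-- what changed: Replaces Counter construction and three Counter subtractions (hash-based) with sorting both lists and a single two-pointer merge that counts the multiset intersection, then decides the +1/0/-1 adjustment from the lengths.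
import Mathlib
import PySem

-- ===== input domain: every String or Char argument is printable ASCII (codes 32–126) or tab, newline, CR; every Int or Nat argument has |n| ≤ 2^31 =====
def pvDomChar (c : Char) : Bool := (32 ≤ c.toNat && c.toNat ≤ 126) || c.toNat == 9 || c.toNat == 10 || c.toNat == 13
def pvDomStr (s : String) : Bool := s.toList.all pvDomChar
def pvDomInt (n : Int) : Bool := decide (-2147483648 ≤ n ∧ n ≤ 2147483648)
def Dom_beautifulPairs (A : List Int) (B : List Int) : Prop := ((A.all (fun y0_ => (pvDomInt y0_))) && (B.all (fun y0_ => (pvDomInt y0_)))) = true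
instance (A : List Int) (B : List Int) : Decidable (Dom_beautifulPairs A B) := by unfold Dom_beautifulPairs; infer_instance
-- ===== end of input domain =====

-- B replaces A's Counter construction and Counter subtraction with sorting both lists and a
-- two-pointer merge that counts the multiset intersection (alternative algorithm, same value).

-- ===== PORT A =====
-- Counter.__sub__, transliterated: the first loop keeps positive (self - other) counts,
-- the second loop adds negated negative counts of `other` for keys absent from `self`.
def counterSub (s t : PySem.Dict Int Int) : PySem.Dict Int Int :=
  let r := s.items.foldl (fun r p =>
    let nc := p.2 - t.getD p.1 0
    if 0 < nc then r.insert p.1 nc else r) PySem.Dict.empty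
  t.items.foldl (fun r p =>
    if s.contains p.1 = false ∧ p.2 < 0 then r.insert p.1 (-p.2) else r) r

def beautifulPairs (A : List Int) (B : List Int) : Int :=
  let countA := PySem.Dict.counter A
  let countB := PySem.Dict.counter B
  let a_b := counterSub countA countB
  let b_a := counterSub countB countA
  let bset := counterSub countA a_b
  let setsize := (bset.keys.map (fun k => bset.getD k 0)).sum
  if 0 < b_a.size ∧ 0 < a_b.size then setsize + 1
  else if a_b.size = 0 ∧ 0 < b_a.size then setsize
  else if b_a.size = 0 ∧ 0 ≤ a_b.size then setsize - 1
  else setsize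

-- ===== PORT B =====
-- Source B's while-loop over indices i, j, written as structural recursion on the two sorted lists
def twoPtr : List Int → List Int → Int
  | [], _ => 0
  | _ :: _, [] => 0
  | a :: as, b :: bs =>
    if a < b then twoPtr as (b :: bs)
    else if b < a then twoPtr (a :: as) bs
    else 1 + twoPtr as bs
termination_by xs ys => xs.length + ys.length
decreasing_by all_goals simp <;> omega

def beautifulPairs_alt (A : List Int) (B : List Int) : Int :=
  let sa := PySem.List.sorted A (fun x => x) false
  let sb := PySem.List.sorted B (fun x => x) false
  let setsize := twoPtr sa sb
  if (B.length : Int) = setsize then setsize - 1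
  else if setsize < (A.length : Int) then setsize + 1
  else setsize

-- ===== PRECONDITION & SPEC =====
def Spec_beautifulPairs (A : List Int) (B : List Int) (out : Int) : Prop := out = beautifulPairs_alt A B
instance (A : List Int) (B : List Int) (out : Int) : Decidable (Spec_beautifulPairs A B out) := by unfold Spec_beautifulPairs; infer_instance

-- ===== CLAIM (what is proved, stated in full; the proofs are below) =====
def Claim_equal_beautifulPairs : Prop := ∀ (A : List Int) (B : List Int), Dom_beautifulPairs A B → Spec_beautifulPairs A B (beautifulPairs A B)

-- ===== LEMMAS AND PROOFS =====

-- B side: the two-pointer count of two sorted lists is the multiset-intersection size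
theorem twoPtr_eq_card_inter (sa sb : List Int)
    (ha : sa.Pairwise (· ≤ ·)) (hb : sb.Pairwise (· ≤ ·)) :
    twoPtr sa sb = (((sa : Multiset Int) ∩ (sb : Multiset Int)).card : Int) := by
  fun_induction twoPtr sa sb with
  | case1 t => simp
  | case2 a as => simp
  | case3 a as b bs hab ih =>
    rw [List.pairwise_cons] at ha
    have hnot : a ∉ ((b :: bs : List Int) : Multiset Int) := by
      simp only [Multiset.mem_coe, List.mem_cons]
      rintro (rfl | hm)
      · omega
      · have := (List.pairwise_cons.mp hb).1 a hm
        omega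
    rw [← Multiset.cons_coe, Multiset.cons_inter_of_neg _ hnot]
    exact ih ha.2 hb
  | case4 a as b bs hab hba ih =>
    rw [List.pairwise_cons] at hb
    have hnot : b ∉ ((a :: as : List Int) : Multiset Int) := by
      simp only [Multiset.mem_coe, List.mem_cons]
      rintro (rfl | hm)
      · omega
      · have := (List.pairwise_cons.mp ha).1 b hm
        omega
    rw [Multiset.inter_comm, ← Multiset.cons_coe, Multiset.cons_inter_of_neg _ hnot,
      Multiset.inter_comm]
    exact ih ha hb.2
  | case5 a as b bs hab hba ih =>
    have heq : a = b := by omega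
    subst heq
    have hmem : a ∈ (a ::ₘ (bs : Multiset Int)) := by simp
    rw [← Multiset.cons_coe, ← Multiset.cons_coe, Multiset.cons_inter_of_pos _ hmem,
      Multiset.erase_cons_head]
    rw [List.pairwise_cons] at ha hb
    rw [ih ha.2 hb.2]
    push_cast [Multiset.card_cons]
    ring

theorem items_insert_fresh (d : PySem.Dict Int Int) (k : Int) (v : Int)
    (h : d.contains k = false) : (d.insert k v).items = d.items ++ [(k, v)] := by
  simp [PySem.Dict.insert, h]

-- the second Counter.__sub__ loop never fires when every item of t has a nonnegative count
theorem foldl2_id (s : PySem.Dict Int Int) (qs : List (Int × Int)) (r : PySem.Dict Int Int)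
    (h : ∀ p ∈ qs, 0 ≤ p.2) :
    qs.foldl (fun r p =>
      if s.contains p.1 = false ∧ p.2 < 0 then r.insert p.1 (-p.2) else r) r = r := by
  induction qs generalizing r with
  | nil => rfl
  | cons q qs ih =>
    have h0 : ¬ (s.contains q.1 = false ∧ q.2 < 0) := by
      rintro ⟨-, hlt⟩; exact absurd (h q (by simp)) (by omega)
    simp only [List.foldl_cons, if_neg h0]
    exact ih r (fun p hp => h p (by simp [hp]))

-- the first Counter.__sub__ loop builds exactly the filterMap of positive differences
theorem foldl1_items (t : PySem.Dict Int Int) (ps : List (Int × Int)) (r : PySem.Dict Int Int)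
    (hdisj : ∀ p ∈ ps, r.contains p.1 = false) (hnd : (ps.map (·.1)).Nodup) :
    (ps.foldl (fun r p =>
        let nc := p.2 - t.getD p.1 0
        if 0 < nc then r.insert p.1 nc else r) r).items
      = r.items ++ ps.filterMap (fun p =>
          let nc := p.2 - t.getD p.1 0
          if 0 < nc then some (p.1, nc) else none) := by
  induction ps generalizing r with
  | nil => simp
  | cons p ps ih =>
    simp only [List.map_cons, List.nodup_cons, List.mem_map] at hnd
    by_cases hc : 0 < p.2 - t.getD p.1 0
    · have hfresh := hdisj p (by simp)
      have hins := items_insert_fresh r p.1 (p.2 - t.getD p.1 0) hfresh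
      have hd2 : ∀ q ∈ ps, (r.insert p.1 (p.2 - t.getD p.1 0)).contains q.1 = false := by
        intro q hq
        have hne : p.1 ≠ q.1 := fun he => hnd.1 ⟨q, hq, he.symm⟩
        have h1 : r.contains q.1 = false := hdisj q (by simp [hq])
        simp only [PySem.Dict.contains, hins, List.any_append, List.any_cons,
          List.any_nil, Bool.or_false]
        simp only [PySem.Dict.contains] at h1
        rw [h1]
        simp [hne]
      simp only [List.foldl_cons, if_pos hc]
      rw [ih _ hd2 hnd.2, hins, List.filterMap_cons]
      rw [if_pos hc]
      simp
    · simp only [List.foldl_cons, if_neg hc]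
      rw [ih _ (fun q hq => hdisj q (by simp [hq])) hnd.2, List.filterMap_cons]
      rw [if_neg hc]

theorem counterSub_items (s t : PySem.Dict Int Int)
    (hnd : (s.items.map (·.1)).Nodup) (ht : ∀ p ∈ t.items, 0 ≤ p.2) :
    (counterSub s t).items = s.items.filterMap (fun p =>
        let nc := p.2 - t.getD p.1 0
        if 0 < nc then some (p.1, nc) else none) := by
  unfold counterSub
  rw [foldl2_id s t.items _ ht]
  rw [foldl1_items t s.items PySem.Dict.empty (fun p _ => rfl) hnd]
  rfl

-- lookup in a dict whose items are a filterMap of positive values over a nodup key list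
theorem getD_filterMap (ds : List Int) (f : Int → Int) (hnd : ds.Nodup) (k : Int)
    (d : PySem.Dict Int Int)
    (h : d.items = ds.filterMap (fun x => if 0 < f x then some (x, f x) else none)) :
    d.getD k 0 = if k ∈ ds ∧ 0 < f k then f k else 0 := by
  simp only [PySem.Dict.getD, PySem.Dict.get?, h]
  clear h
  induction ds with
  | nil => simp
  | cons x ds ih =>
    simp only [List.nodup_cons] at hnd
    have hcons : ∀ (hk : x ≠ k), ((k ∈ x :: ds ∧ 0 < f k) ↔ (k ∈ ds ∧ 0 < f k)) := by
      intro hk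
      constructor
      · rintro ⟨hm, hp⟩
        rcases List.mem_cons.mp hm with h1 | h1
        · exact absurd h1.symm hk
        · exact ⟨h1, hp⟩
      · rintro ⟨hm, hp⟩; exact ⟨List.mem_cons_of_mem _ hm, hp⟩
    by_cases hx : 0 < f x
    · rw [List.filterMap_cons, if_pos hx]
      by_cases hk : x = k
      · subst hk
        simp [hx]
      · simp only [List.find?_cons]
        have hb : ((x, f x).1 == k) = false := by simp [hk]
        rw [hb, ih hnd.2, if_congr (hcons hk) rfl rfl]
    · rw [List.filterMap_cons, if_neg hx, ih hnd.2]
      by_cases hk : x = k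
      · subst hk
        simp [hx]
      · rw [if_congr (hcons hk) rfl rfl]

-- mapping getD over the keys of a nodup-keyed dict returns the stored values
theorem map_getD_keys (d : PySem.Dict Int Int) (hnd : (d.items.map (·.1)).Nodup) :
    d.keys.map (fun k => d.getD k 0) = d.items.map (·.2) := by
  simp only [PySem.Dict.keys, PySem.Dict.getD, PySem.Dict.get?]
  obtain ⟨l⟩ := d
  simp only at *
  induction l with
  | nil => simp
  | cons p l ih =>
    simp only [List.map_cons, List.nodup_cons, List.mem_map] at hnd ⊢
    congr 1
    · simp
    have step : ∀ k ∈ l.map (·.1),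
        (List.find? (fun q => q.1 == k) (p :: l)) = List.find? (fun q => q.1 == k) l := by
      intro k hk
      rcases List.mem_map.mp hk with ⟨q, hq, rfl⟩
      have hne : (p.1 == q.1) = false := by
        simp only [beq_eq_false_iff_ne, ne_eq]
        intro he; exact hnd.1 ⟨q, hq, he.symm⟩
      rw [List.find?_cons, hne]
    calc (l.map (·.1)).map (fun k => (Option.map (·.2) (List.find? (fun q => q.1 == k) (p :: l))).getD 0)
        = (l.map (·.1)).map (fun k => (Option.map (·.2) (List.find? (fun q => q.1 == k) l)).getD 0) := by
          apply List.map_congr_left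
          intro k hk
          rw [step k hk]
      _ = l.map (·.2) := ih hnd.2

theorem fst_filterMap (ds : List Int) (f : Int → Int) :
    (ds.filterMap (fun x => if 0 < f x then some (x, f x) else none)).map (·.1)
      = ds.filter (fun x => decide (0 < f x)) := by
  induction ds with
  | nil => rfl
  | cons x ds ih =>
    rw [List.filterMap_cons, List.filter_cons]
    by_cases hx : 0 < f x
    · rw [if_pos hx]; simp only [hx, decide_true, if_true, List.map_cons, ih]
    · rw [if_neg hx]; simp [hx, ih]

theorem snd_filterMap (ds : List Int) (f : Int → Int) :
    (ds.filterMap (fun x => if 0 < f x then some (x, f x) else none)).map (·.2)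
      = (ds.filter (fun x => decide (0 < f x))).map f := by
  induction ds with
  | nil => rfl
  | cons x ds ih =>
    rw [List.filterMap_cons, List.filter_cons]
    by_cases hx : 0 < f x
    · rw [if_pos hx]; simp only [hx, decide_true, if_true, List.map_cons, ih]
    · rw [if_neg hx]; simp [hx, ih]

theorem sum_filter_pos (l : List Int) (f : Int → Int) (h : ∀ x ∈ l, 0 ≤ f x) :
    ((l.filter (fun x => decide (0 < f x))).map f).sum = (l.map f).sum := by
  induction l with
  | nil => rfl
  | cons x l ih =>
    rw [List.filter_cons, List.map_cons, List.sum_cons]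
    by_cases hx : 0 < f x
    · simp only [hx, decide_true, if_true, List.map_cons, List.sum_cons]
      rw [ih (fun y hy => h y (by simp [hy]))]
    · simp only [hx, decide_false, Bool.false_eq_true, if_false]
      rw [ih (fun y hy => h y (by simp [hy]))]
      have : f x = 0 := le_antisymm (by omega) (h x (by simp))
      omega

theorem sum_min_eq_card_inter (A B : List Int) :
    (((PySem.Set.ofList A).map (fun k => min (A.count k) (B.count k))).sum : ℕ)
      = ((A : Multiset Int) ∩ (B : Multiset Int)).card := by
  have hnd : (PySem.Set.ofList A).Nodup := by
    rw [← PySem.List.dedup_eq_ofList]; exact PySem.List.nodup_dedup A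
  rw [← List.sum_toFinset _ hnd]
  have htf : (PySem.Set.ofList A).toFinset = A.toFinset := by
    ext x
    simp only [List.mem_toFinset, ← PySem.List.dedup_eq_ofList, PySem.List.mem_dedup]
  rw [htf]
  have h1 : ∑ k ∈ A.toFinset, min (A.count k) (B.count k)
      = ∑ k ∈ A.toFinset, ((A : Multiset Int) ∩ (B : Multiset Int)).count k := by
    apply Finset.sum_congr rfl
    intro x _
    rw [Multiset.count_inter]
    simp
  rw [h1]
  rw [← Finset.sum_subset (s₁ := ((A : Multiset Int) ∩ (B : Multiset Int)).toFinset)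
        (s₂ := A.toFinset) ?hsub ?hzero]
  · exact Multiset.toFinset_sum_count_eq _
  case hsub =>
    intro x hx
    have hm : x ∈ ((A : Multiset Int) ∩ (B : Multiset Int)) := Multiset.mem_toFinset.mp hx
    have := Multiset.mem_of_le Multiset.inter_le_left hm
    simpa using this
  case hzero =>
    intro x _ hnx
    rw [Multiset.count_eq_zero]
    intro hm
    exact hnx (Multiset.mem_toFinset.mpr hm)

theorem card_inter_eq_iff_le (A B : List Int) :
    ((A : Multiset Int) ∩ (B : Multiset Int)).card = A.length
      ↔ (A : Multiset Int) ≤ (B : Multiset Int) := by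
  constructor
  · intro h
    have hle : ((A : Multiset Int) ∩ (B : Multiset Int)) ≤ (A : Multiset Int) :=
      Multiset.inter_le_left
    have hcard : ((A : Multiset Int)).card ≤ ((A : Multiset Int) ∩ (B : Multiset Int)).card := by
      rw [h]; simp
    have heq := Multiset.eq_of_le_of_card_le hle hcard
    exact le_trans (le_of_eq heq.symm) Multiset.inter_le_right
  · intro h
    have heq : (A : Multiset Int) ∩ (B : Multiset Int) = (A : Multiset Int) := inf_eq_left.mpr h
    rw [heq]
    simp

theorem nodup_ofList' (X : List Int) : (PySem.Set.ofList X).Nodup := by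
  rw [← PySem.List.dedup_eq_ofList]; exact PySem.List.nodup_dedup X

theorem mem_ofList' (X : List Int) (x : Int) : x ∈ PySem.Set.ofList X ↔ x ∈ X := by
  rw [← PySem.List.dedup_eq_ofList]; exact PySem.List.mem_dedup X x

theorem nodup_keys_counter' (X : List Int) :
    ((PySem.Dict.counter X).items.map (·.1)).Nodup := by
  rw [PySem.Dict.items_counter, List.map_map]
  have hco : ((fun x : Int × Int => x.1) ∘ fun k : Int => (k, (X.count k : Int))) = id := by
    funext k; rfl
  rw [hco, List.map_id]
  exact nodup_ofList' X

theorem counter_items_nonneg (X : List Int) :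
    ∀ p ∈ (PySem.Dict.counter X).items, 0 ≤ p.2 := by
  intro p hp
  rw [PySem.Dict.items_counter] at hp
  rcases List.mem_map.mp hp with ⟨k, _, rfl⟩
  positivity

-- the items of countX - countY: positive count differences over the distinct keys of X
theorem sub_counters_items (X Y : List Int) :
    (counterSub (PySem.Dict.counter X) (PySem.Dict.counter Y)).items
      = (PySem.Set.ofList X).filterMap (fun k =>
          if 0 < (X.count k : Int) - (Y.count k : Int)
          then some (k, (X.count k : Int) - (Y.count k : Int)) else none) := by
  rw [counterSub_items _ _ (nodup_keys_counter' X) (counter_items_nonneg Y)]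
  rw [PySem.Dict.items_counter, List.filterMap_map]
  apply List.filterMap_congr
  intro k _
  simp only [Function.comp, PySem.Dict.getD_counter]

theorem sub_counters_size_zero (X Y : List Int) :
    (counterSub (PySem.Dict.counter X) (PySem.Dict.counter Y)).size = 0
      ↔ (X : Multiset Int) ≤ (Y : Multiset Int) := by
  show ((counterSub (PySem.Dict.counter X) (PySem.Dict.counter Y)).items).length = 0 ↔ _
  rw [sub_counters_items, List.length_eq_zero_iff, List.filterMap_eq_nil_iff]
  constructor
  · intro h
    rw [Multiset.le_iff_count]
    intro a
    simp only [Multiset.coe_count]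
    by_cases ha : a ∈ X
    · have := h a ((mem_ofList' X a).mpr ha)
      by_cases hpos : 0 < (X.count a : Int) - (Y.count a : Int)
      · rw [if_pos hpos] at this; exact absurd this (by simp)
      · omega
    · have : X.count a = 0 := List.count_eq_zero.mpr ha
      omega
  · intro h k _
    rw [Multiset.le_iff_count] at h
    have := h k
    simp only [Multiset.coe_count] at this
    rw [if_neg (by omega)]

theorem bset_getD_sum (A B : List Int) :
    ((counterSub (PySem.Dict.counter A)
        (counterSub (PySem.Dict.counter A) (PySem.Dict.counter B))).keys.map
      (fun k => (counterSub (PySem.Dict.counter A)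
        (counterSub (PySem.Dict.counter A) (PySem.Dict.counter B))).getD k 0)).sum
      = ((((A : Multiset Int) ∩ (B : Multiset Int)).card : ℕ) : Int) := by
  set a_b := counterSub (PySem.Dict.counter A) (PySem.Dict.counter B) with ha_b
  have hab_items := sub_counters_items A B
  have hab_getD : ∀ k, a_b.getD k 0
      = if k ∈ PySem.Set.ofList A ∧ 0 < (A.count k : Int) - (B.count k : Int)
        then (A.count k : Int) - (B.count k : Int) else 0 := by
    intro k
    exact getD_filterMap (PySem.Set.ofList A)
      (fun k => (A.count k : Int) - (B.count k : Int)) (nodup_ofList' A) k a_b hab_items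
  have hab_nonneg : ∀ p ∈ a_b.items, 0 ≤ p.2 := by
    intro p hp
    rw [hab_items] at hp
    rcases List.mem_filterMap.mp hp with ⟨k, _, hk⟩
    by_cases hpos : 0 < (A.count k : Int) - (B.count k : Int)
    · rw [if_pos hpos] at hk
      cases hk
      omega
    · rw [if_neg hpos] at hk
      exact absurd hk (by simp)
  set bset := counterSub (PySem.Dict.counter A) a_b with hbset
  have hbset_items : bset.items = (PySem.Set.ofList A).filterMap (fun k =>
      if 0 < ((min (A.count k) (B.count k) : ℕ) : Int)
      then some (k, ((min (A.count k) (B.count k) : ℕ) : Int)) else none) := by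
    rw [hbset, counterSub_items _ _ (nodup_keys_counter' A) hab_nonneg,
      PySem.Dict.items_counter, List.filterMap_map]
    apply List.filterMap_congr
    intro k hk
    have hmem : k ∈ A := (mem_ofList' A k).mp hk
    have hc1 : 1 ≤ A.count k := List.count_pos_iff.mpr hmem
    have hval : (A.count k : Int) - a_b.getD k 0 = ((min (A.count k) (B.count k) : ℕ) : Int) := by
      rw [hab_getD k]
      by_cases hpos : 0 < (A.count k : Int) - (B.count k : Int)
      · rw [if_pos ⟨hk, hpos⟩]
        have : min (A.count k) (B.count k) = B.count k := by omega
        rw [this]; omega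
      · rw [if_neg (by intro hc; exact hpos hc.2)]
        have : min (A.count k) (B.count k) = A.count k := by omega
        rw [this]; omega
    simp only [Function.comp]
    rw [hval]
  have hnd_keys : (bset.items.map (·.1)).Nodup := by
    rw [hbset_items]
    rw [fst_filterMap (PySem.Set.ofList A) (fun k => ((min (A.count k) (B.count k) : ℕ) : Int))]
    exact (nodup_ofList' A).filter _
  rw [map_getD_keys bset hnd_keys, hbset_items,
    snd_filterMap (PySem.Set.ofList A) (fun k => ((min (A.count k) (B.count k) : ℕ) : Int)),
    sum_filter_pos]
  · rw [show ((PySem.Set.ofList A).map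
        (fun k => ((min (A.count k) (B.count k) : ℕ) : Int))).sum
      = (((PySem.Set.ofList A).map (fun k => min (A.count k) (B.count k))).sum : ℕ) from ?_]
    · rw [sum_min_eq_card_inter]
    · rw [Nat.cast_list_sum, List.map_map]
      rfl
  · intro x _
    positivity

theorem beautifulPairs_eq (A B : List Int) :
    beautifulPairs A B = beautifulPairs_alt A B := by
  unfold beautifulPairs beautifulPairs_alt
  simp only []
  set s : ℕ := ((A : Multiset Int) ∩ (B : Multiset Int)).card with hs
  have hsetA : (((counterSub (PySem.Dict.counter A)
      (counterSub (PySem.Dict.counter A) (PySem.Dict.counter B))).keys.map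
      (fun k => (counterSub (PySem.Dict.counter A)
      (counterSub (PySem.Dict.counter A) (PySem.Dict.counter B))).getD k 0)).sum) = (s : Int) :=
    bset_getD_sum A B
  have hsetB : twoPtr (PySem.List.sorted A (fun x : Int => x) false)
      (PySem.List.sorted B (fun x : Int => x) false) = (s : Int) := by
    rw [twoPtr_eq_card_inter _ _ (PySem.List.sorted_pairwise A (fun x : Int => x))
      (PySem.List.sorted_pairwise B (fun x : Int => x))]
    congr 1
    rw [hs]
    have pa : ((PySem.List.sorted A (fun x : Int => x) false : List Int) : Multiset Int)
        = (A : Multiset Int) :=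
      Multiset.coe_eq_coe.mpr (PySem.List.sorted_perm A (fun x : Int => x) false)
    have pb : ((PySem.List.sorted B (fun x : Int => x) false : List Int) : Multiset Int)
        = (B : Multiset Int) :=
      Multiset.coe_eq_coe.mpr (PySem.List.sorted_perm B (fun x : Int => x) false)
    rw [pa, pb]
  have hA0 : (counterSub (PySem.Dict.counter A) (PySem.Dict.counter B)).size = 0
      ↔ s = A.length := by
    rw [sub_counters_size_zero, ← card_inter_eq_iff_le, hs]
  have hB0 : (counterSub (PySem.Dict.counter B) (PySem.Dict.counter A)).size = 0
      ↔ s = B.length := by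
    rw [sub_counters_size_zero, ← card_inter_eq_iff_le]
    constructor
    · intro h
      rw [hs, Multiset.inter_comm]; exact h
    · intro h
      rw [← h, hs, Multiset.inter_comm]
  have hsA : s ≤ A.length := by
    have := Multiset.card_le_card (Multiset.inter_le_left
      (s := (A : Multiset Int)) (t := (B : Multiset Int)))
    simpa [hs] using this
  have hsB : s ≤ B.length := by
    have := Multiset.card_le_card (Multiset.inter_le_right
      (s := (A : Multiset Int)) (t := (B : Multiset Int)))
    simpa [hs] using this
  rw [hsetA, hsetB]
  by_cases hB : s = B.length
  · have hBz : (counterSub (PySem.Dict.counter B) (PySem.Dict.counter A)).size = 0 :=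
      hB0.mpr hB
    rw [if_neg (by rw [hBz]; rintro ⟨h1, -⟩; omega)]
    rw [if_neg (by rw [hBz]; rintro ⟨-, h2⟩; omega)]
    rw [if_pos ⟨hBz, by omega⟩]
    rw [if_pos (by omega)]
  · have hBpos : 0 < (counterSub (PySem.Dict.counter B) (PySem.Dict.counter A)).size := by
      rcases Nat.eq_zero_or_pos (counterSub (PySem.Dict.counter B) (PySem.Dict.counter A)).size
        with h0 | h0
      · exact absurd (hB0.mp h0) hB
      · exact h0
    rw [if_neg (show ¬ ((B.length : Int) = (s : Int)) by
      intro h; exact hB (by exact_mod_cast h.symm))]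
    by_cases hA : s = A.length
    · have hAz : (counterSub (PySem.Dict.counter A) (PySem.Dict.counter B)).size = 0 :=
        hA0.mpr hA
      rw [if_neg (by rw [hAz]; rintro ⟨-, h2⟩; omega)]
      rw [if_pos ⟨hAz, hBpos⟩]
      rw [if_neg (by omega)]
    · have hApos : 0 < (counterSub (PySem.Dict.counter A) (PySem.Dict.counter B)).size := by
        rcases Nat.eq_zero_or_pos (counterSub (PySem.Dict.counter A) (PySem.Dict.counter B)).size
          with h0 | h0
        · exact absurd (hA0.mp h0) hA
        · exact h0
      rw [if_pos ⟨hBpos, hApos⟩]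
      rw [if_pos (by omega)]

-- ===== VERDICT (by name: the statement is the Claim_ definition above) =====
theorem beautifulPairs_spec : Claim_equal_beautifulPairs := by
  intro A B _
  show beautifulPairs A B = beautifulPairs_alt A B
  exact beautifulPairs_eq A B
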